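-- pv_equiv track=rewrite | github.com/dravalico/LLMGIpy | src/scripts/function_util.py | try_to_remove_extra_strings
-- ===== SOURCE A (Python) =====
-- from typing import List, Any
--
-- def try_to_remove_extra_strings(code: str) -> str:
--     code: str = code.replace("    ", '\t')
--     lines: List[str] = code.split('\n')
--     code = lines[0]
--     is_start: bool = True
--     for line in lines[1:]:
--         if is_start and line.count('\t') < 1:
--             code += '\n' + line
--             continue
--         if line.count('\t') >= 1:
--             is_start = False
--             code += '\n' + line
--     return code
-- ===== SOURCE B (Python) =====
-- def try_to_remove_extra_strings(code: str) -> str: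
--     lines = code.replace("    ", '\t').split('\n')
--     tail = lines[1:]
--     # index of the first tabbed line after the header (len(tail) if none)
--     i = next((k for k, line in enumerate(tail) if '\t' in line), len(tail))
--     kept = [lines[0]] + tail[:i] + [line for line in tail[i:] if '\t' in line]
--     return '\n'.join(kept)
-- ===== Notes on version B (the rewrite author's own statement) =====
-- stated objective: simpler
-- what changed: Replaces A's single stateful pass with an is_start flag by computing the boundary (first tabbed line after the header) once, then concatenating header + untouched prefix + tab-filtered tail with one join.
import Mathlib
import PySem

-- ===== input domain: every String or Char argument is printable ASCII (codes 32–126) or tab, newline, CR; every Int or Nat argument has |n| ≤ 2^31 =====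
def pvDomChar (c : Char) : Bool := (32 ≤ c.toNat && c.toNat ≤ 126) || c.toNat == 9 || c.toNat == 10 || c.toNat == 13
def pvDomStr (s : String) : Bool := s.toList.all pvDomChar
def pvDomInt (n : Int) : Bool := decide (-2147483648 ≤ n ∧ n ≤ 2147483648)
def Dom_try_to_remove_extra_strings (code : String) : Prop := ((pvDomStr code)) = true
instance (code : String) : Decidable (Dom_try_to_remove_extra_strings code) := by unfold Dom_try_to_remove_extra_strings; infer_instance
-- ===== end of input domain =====

-- B replaces A's stateful is_start pass by an explicit boundary split + filtered tail (objective: simpler).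

-- ===== PORT A =====
def try_to_remove_extra_strings (code : String) : String :=
  let code1 := PySem.Str.replace code "    " "\t"
  -- code.split('\n'): sep "\n" ≠ "" so split? is always some; the result is never empty, so
  -- lines[0] (which would raise only on an empty list) is lines.headD ""
  let lines := (PySem.Str.split? code1 "\n").getD []
  ((lines.drop 1).foldl
    (fun (st : String × Bool) line =>
      if st.2 = true ∧ PySem.Str.count line "\t" < 1 then (st.1 ++ "\n" ++ line, st.2)
      else if 1 ≤ PySem.Str.count line "\t" then (st.1 ++ "\n" ++ line, false)
      else st)
    (lines.headD "", true)).1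

-- ===== PORT B =====
def try_to_remove_extra_strings_alt (code : String) : String :=
  let lines := (PySem.Str.split? (PySem.Str.replace code "    " "\t") "\n").getD []
  let tail := lines.drop 1
  -- next((k for k, line in enumerate(tail) if '\t' in line), len(tail)) is List.findIdx
  let i := tail.findIdx (fun line => PySem.Str.isIn "\t" line)
  -- tail[:i] / tail[i:] with 0 ≤ i ≤ len(tail) are exactly take i / drop i
  PySem.Str.join "\n"
    (lines.headD "" :: (tail.take i ++ (tail.drop i).filter (fun line => PySem.Str.isIn "\t" line)))

-- ===== PRECONDITION & SPEC =====
def Spec_try_to_remove_extra_strings (code : String) (out : String) : Prop := out = try_to_remove_extra_strings_alt code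
instance (code : String) (out : String) : Decidable (Spec_try_to_remove_extra_strings code out) := by unfold Spec_try_to_remove_extra_strings; infer_instance

-- ===== CLAIM (what is proved, stated in full; the proofs are below) =====
def Claim_equal_try_to_remove_extra_strings : Prop := ∀ (code : String), Dom_try_to_remove_extra_strings code → Spec_try_to_remove_extra_strings code (try_to_remove_extra_strings code)

-- ===== LEMMAS AND PROOFS =====

-- count.go on the single-character pattern '\t' is List.count
lemma countGo_tab : ∀ (s : List Char) (fuel acc : Nat), s.length ≤ fuel →
    PySem.Chars.count.go ['\t'] fuel s acc = acc + s.count '\t' := by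
  intro s
  induction s with
  | nil => intro fuel acc _; cases fuel <;> simp [PySem.Chars.count.go]
  | cons h t ih =>
    intro fuel acc hle
    cases fuel with
    | zero => simp at hle
    | succ f =>
      simp only [PySem.Chars.count.go]
      by_cases hh : h = '\t'
      · subst hh
        simp only [List.isPrefixOf, List.length_cons] at *
        rw [if_pos (by simp)]
        simp only [List.length_nil, List.drop_succ_cons, List.drop_zero]
        rw [ih f (acc + 1) (by omega)]
        simp
        omega
      · rw [if_neg (by simp [List.isPrefixOf]; exact fun e => hh e.symm)]
        rw [ih f acc (by simp at hle; omega)]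
        simp [hh]

lemma count_tab_eq (l : List Char) : PySem.Chars.count l ['\t'] = l.count '\t' := by
  simp [PySem.Chars.count, countGo_tab l l.length 0 le_rfl]

-- A's test line.count('\t') < 1 is the negation of B's test '\t' in line
lemma count_lt_one_iff (line : String) :
    PySem.Str.count line "\t" < 1 ↔ PySem.Str.isIn "\t" line = false := by
  rw [PySem.Str.count_eq, PySem.Str.isIn_eq]
  have ht : ("\t" : String).toList = ['\t'] := by decide
  rw [ht, count_tab_eq, PySem.Chars.isIn_eq_false_iff, List.singleton_infix_iff]
  simp [List.count_eq_zero]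

-- folding ++'\n'++ is join '\n'
lemma chars_join_cons (sep a x : List Char) (xs : List (List Char)) :
    PySem.Chars.join sep (a :: x :: xs) = PySem.Chars.join sep ((a ++ sep ++ x) :: xs) := by
  cases xs with
  | nil => simp [PySem.Chars.join_cons_cons, PySem.Chars.join_singleton]
  | cons y ys =>
    rw [PySem.Chars.join_cons_cons, PySem.Chars.join_cons_cons, PySem.Chars.join_cons_cons]
    simp [List.append_assoc]

lemma foldl_append_join : ∀ (xs : List String) (acc : String),
    xs.foldl (fun c l => c ++ "\n" ++ l) acc = PySem.Str.join "\n" (acc :: xs) := by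
  intro xs
  induction xs with
  | nil =>
    intro acc
    apply String.toList_injective
    simp [PySem.Str.toList_join, PySem.Chars.join_singleton]
  | cons x xs ih =>
    intro acc
    simp only [List.foldl_cons]
    rw [ih]
    apply String.toList_injective
    simp only [PySem.Str.toList_join, List.map_cons, String.toList_append]
    exact (chars_join_cons _ _ _ _).symm

-- A's loop after is_start has been cleared: keep exactly the tabbed lines
lemma loopFalse : ∀ (ls : List String) (acc : String),
    ls.foldl
      (fun (st : String × Bool) line =>
        if st.2 = true ∧ PySem.Str.count line "\t" < 1 then (st.1 ++ "\n" ++ line, st.2)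
        else if 1 ≤ PySem.Str.count line "\t" then (st.1 ++ "\n" ++ line, false)
        else st)
      (acc, false)
    = ((ls.filter (fun line => PySem.Str.isIn "\t" line)).foldl (fun c l => c ++ "\n" ++ l) acc,
       false) := by
  intro ls
  induction ls with
  | nil => intro acc; rfl
  | cons l ls ih =>
    intro acc
    simp only [List.foldl_cons, List.filter_cons]
    by_cases h : PySem.Str.isIn "\t" l = true
    · have h1 : ¬ PySem.Str.count l "\t" < 1 := by
        rw [count_lt_one_iff, h]; simp
      rw [if_neg (fun hc => h1 hc.2), if_pos (by omega), ih, if_pos h, List.foldl_cons]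
    · have h1 : PySem.Str.count l "\t" < 1 := by
        rw [count_lt_one_iff]; simpa using h
      rw [if_neg (by simp), if_neg (by omega), ih, if_neg h]

-- A's loop from the start: untouched no-tab prefix, then only tabbed lines
lemma loopTrue : ∀ (ls : List String) (acc : String),
    (ls.foldl
      (fun (st : String × Bool) line =>
        if st.2 = true ∧ PySem.Str.count line "\t" < 1 then (st.1 ++ "\n" ++ line, st.2)
        else if 1 ≤ PySem.Str.count line "\t" then (st.1 ++ "\n" ++ line, false)
        else st)
      (acc, true)).1
    = ((ls.takeWhile (fun line => !PySem.Str.isIn "\t" line)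
        ++ (ls.dropWhile (fun line => !PySem.Str.isIn "\t" line)).filter
             (fun line => PySem.Str.isIn "\t" line)).foldl
        (fun c l => c ++ "\n" ++ l) acc) := by
  intro ls
  induction ls with
  | nil => intro acc; rfl
  | cons l ls ih =>
    intro acc
    simp only [List.foldl_cons, List.takeWhile_cons, List.dropWhile_cons]
    by_cases h : PySem.Str.isIn "\t" l = true
    · have h1 : ¬ PySem.Str.count l "\t" < 1 := by
        rw [count_lt_one_iff, h]; simp
      rw [if_neg (fun hc => h1 hc.2), if_pos (by omega), loopFalse]
      rw [if_neg (by rw [h]; simp), if_neg (by rw [h]; simp)]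
      rw [List.nil_append, List.filter_cons, if_pos h, List.foldl_cons]
    · have h0 : PySem.Str.isIn "\t" l = false := by simpa using h
      have h1 : PySem.Str.count l "\t" < 1 := by
        rw [count_lt_one_iff]; exact h0
      rw [if_pos ⟨by simp, h1⟩, ih]
      rw [if_pos (by rw [h0]; simp), if_pos (by rw [h0]; simp)]
      rw [List.cons_append, List.foldl_cons]

-- the common body, over an arbitrary line list
lemma body_eq (lines : List String) :
    ((lines.drop 1).foldl
      (fun (st : String × Bool) line =>
        if st.2 = true ∧ PySem.Str.count line "\t" < 1 then (st.1 ++ "\n" ++ line, st.2)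
        else if 1 ≤ PySem.Str.count line "\t" then (st.1 ++ "\n" ++ line, false)
        else st)
      (lines.headD "", true)).1
    = PySem.Str.join "\n"
        (lines.headD "" ::
          ((lines.drop 1).take ((lines.drop 1).findIdx (fun line => PySem.Str.isIn "\t" line)) ++
           ((lines.drop 1).drop ((lines.drop 1).findIdx (fun line => PySem.Str.isIn "\t" line))).filter
             (fun line => PySem.Str.isIn "\t" line))) := by
  rw [loopTrue, foldl_append_join,
    List.takeWhile_eq_take_findIdx_not, List.dropWhile_eq_drop_findIdx_not]
  simp only [Bool.not_not]

-- ===== VERDICT (by name: the statement is the Claim_ definition above) =====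
theorem try_to_remove_extra_strings_spec : Claim_equal_try_to_remove_extra_strings := by
  intro code _
  show try_to_remove_extra_strings code = try_to_remove_extra_strings_alt code
  exact body_eq ((PySem.Str.split? (PySem.Str.replace code "    " "\t") "\n").getD [])
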